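-- pv_equiv track=rewrite | github.com/Omshri47/Interactive-Coding | 1878-get-biggest-three-rhombus-sums-in-a-grid/1878-get-biggest-three-rhombus-sums-in-a-grid.py | getBiggestThree
-- ===== SOURCE A (Python) =====
-- def getBiggestThree(grid):
--     """
--     :type grid: List[List[int]]
--     :rtype: List[int]
--     """
--     m, n = len(grid), len(grid[0])
--     sums = set()
--
--     for r in range(m):
--         for c in range(n):
--
--             sums.add(grid[r][c])
--
--
--             s = 1
--
--             while r + 2 * s < m and c - s >= 0 and c + s < n:
--                 current_sum = 0
--
--                 # Top corner to Right corner
--                 for i in range(s):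
--                     current_sum += grid[r + i][c + i]
--                 # Right corner to Bottom corner
--                 for i in range(s):
--                     current_sum += grid[r + s + i][c + s - i]
--                 # Bottom corner to Left corner
--                 for i in range(s):
--                     current_sum += grid[r + 2 * s - i][c - i]
--                 # Left corner back to Top corner
--                 for i in range(s):
--                     current_sum += grid[r + s - i][c - s + i]
--
--                 sums.add(current_sum)
--                 s += 1
--
--
--     res = sorted(list(sums), reverse=True)
--     return res[:3]
-- ===== SOURCE B (Python) =====
-- def getBiggestThree(grid):
--     """
--     Diagonal prefix sums: each rhombus border is four O(1) prefix-sum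
--     differences instead of four O(s) loops.
--     """
--     m, n = len(grid), len(grid[0])
--     # dp1[r][c] = sum of grid cells going up-left along the "\" diagonal from (r-1, c-1)
--     # dp2[r][c] = sum of grid cells going up-right along the "/" diagonal from (r-1, c)
--     dp1 = [[0] * (n + 1)]
--     dp2 = [[0] * (n + 1)]
--     for r in range(m):
--         p1, p2, row = dp1[r], dp2[r], grid[r]
--         dp1.append([0] + [p1[c] + row[c] for c in range(n)])
--         dp2.append([p2[c + 1] + row[c] for c in range(n)] + [0])
--     sums = set()
--     for r in range(m):
--         for c in range(n):
--             sums.add(grid[r][c])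
--             for s in range(1, min((m - 1 - r) // 2, c, n - 1 - c) + 1):
--                 total = (dp1[r + s][c + s] - dp1[r][c]
--                          + dp2[r + 2 * s][c + 1] - dp2[r + s][c + s + 1]
--                          + dp1[r + 2 * s + 1][c + 1] - dp1[r + s + 1][c - s + 1]
--                          + dp2[r + s + 1][c - s] - dp2[r + 1][c])
--                 sums.add(total)
--     return sorted(sums, reverse=True)[:3]
-- ===== Notes on version B (the rewrite author's own statement) =====
-- stated objective: faster
-- what changed: B precomputes two diagonal prefix-sum tables so every rhombus border sum is four O(1) prefix differences instead of four O(s) cell loops; enumeration bound is computed in closed form instead of a while loop.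
-- outside the precondition, e.g. on getBiggestThree([]): A raises IndexError, B raises IndexError; on getBiggestThree([[1, 2], [3]]): A raises IndexError, B raises IndexError
import Mathlib
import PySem

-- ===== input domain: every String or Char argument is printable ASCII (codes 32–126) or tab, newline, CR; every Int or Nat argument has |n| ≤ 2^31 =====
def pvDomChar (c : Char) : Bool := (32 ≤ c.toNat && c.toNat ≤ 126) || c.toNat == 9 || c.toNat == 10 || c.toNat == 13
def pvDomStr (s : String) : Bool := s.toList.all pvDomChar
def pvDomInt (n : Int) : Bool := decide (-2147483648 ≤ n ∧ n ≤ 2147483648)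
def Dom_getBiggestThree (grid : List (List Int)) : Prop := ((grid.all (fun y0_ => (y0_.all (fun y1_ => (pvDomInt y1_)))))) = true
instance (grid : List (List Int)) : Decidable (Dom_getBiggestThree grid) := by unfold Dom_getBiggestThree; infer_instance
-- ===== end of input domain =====

-- B replaces A's four O(s) per-border loops by O(1) differences of two diagonal
-- prefix-sum tables (objective: faster, asymptotically).

-- ===== PORT A =====
-- grid[a][b] (both indices are in range on every access A performs inside Pre_)
def pvGet (grid : List (List Int)) (a b : Int) : Int :=
  PySem.List.pyGetD (PySem.List.pyGetD grid a []) b 0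

-- the four side loops accumulating current_sum for the rhombus with top corner (r, c) and size s
def pvBorderA (grid : List (List Int)) (r c s : Int) : Int :=
  let cur : Int := 0
  let cur := (PySem.List.pyRange 0 s).foldl (fun acc i => acc + pvGet grid (r + i) (c + i)) cur
  let cur := (PySem.List.pyRange 0 s).foldl (fun acc i => acc + pvGet grid (r + s + i) (c + s - i)) cur
  let cur := (PySem.List.pyRange 0 s).foldl (fun acc i => acc + pvGet grid (r + 2 * s - i) (c - i)) cur
  (PySem.List.pyRange 0 s).foldl (fun acc i => acc + pvGet grid (r + s - i) (c - s + i)) cur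

-- the 'while r + 2 * s < m and c - s >= 0 and c + s < n' loop
def pvWhileA (grid : List (List Int)) (m n r c s : Int) (sums : PySem.Set Int) : PySem.Set Int :=
  if h : r + 2 * s < m ∧ 0 ≤ c - s ∧ c + s < n then
    pvWhileA grid m n r c (s + 1) (sums.add (pvBorderA grid r c s))
  else sums
termination_by (m - (r + 2 * s)).toNat
decreasing_by omega

def getBiggestThree (grid : List (List Int)) : List Int :=
  let m : Int := grid.length
  let n : Int := (PySem.List.pyGetD grid 0 []).length
  let sums : PySem.Set Int :=
    (PySem.List.pyRange 0 m).foldl (fun sums r =>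
      (PySem.List.pyRange 0 n).foldl (fun sums c =>
        pvWhileA grid m n r c 1 (sums.add (pvGet grid r c))) sums) PySem.Set.empty
  PySem.List.slice (PySem.List.sorted sums (fun x => x) true) none (some 3)

-- ===== PORT B =====
-- one step of the table-building loop: appends row r+1 to each table
def pvDpStep (grid : List (List Int)) (n : Int)
    (dp : List (List Int) × List (List Int)) (r : Int) :
    List (List Int) × List (List Int) :=
  let p1 := PySem.List.pyGetD dp.1 r []
  let p2 := PySem.List.pyGetD dp.2 r []
  let row := PySem.List.pyGetD grid r []
  (dp.1 ++ [0 :: (PySem.List.pyRange 0 n).map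
              (fun c => PySem.List.pyGetD p1 c 0 + PySem.List.pyGetD row c 0)],
   dp.2 ++ [((PySem.List.pyRange 0 n).map
              (fun c => PySem.List.pyGetD p2 (c + 1) 0 + PySem.List.pyGetD row c 0)) ++ [0]])

def getBiggestThree_alt (grid : List (List Int)) : List Int :=
  let m : Int := grid.length
  let n : Int := (PySem.List.pyGetD grid 0 []).length
  let dp := (PySem.List.pyRange 0 m).foldl (pvDpStep grid n)
      ([PySem.List.pyRepeat [(0 : Int)] (n + 1)], [PySem.List.pyRepeat [(0 : Int)] (n + 1)])
  let dp1 := dp.1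
  let dp2 := dp.2
  let sums : PySem.Set Int :=
    (PySem.List.pyRange 0 m).foldl (fun sums r =>
      (PySem.List.pyRange 0 n).foldl (fun sums c =>
        let sums := sums.add (pvGet grid r c)
        (PySem.List.pyRange 1 (min (min (PySem.Int.floordiv (m - 1 - r) 2) c) (n - 1 - c) + 1)).foldl
          (fun sums s =>
            sums.add (pvGet dp1 (r + s) (c + s) - pvGet dp1 r c
              + pvGet dp2 (r + 2 * s) (c + 1) - pvGet dp2 (r + s) (c + s + 1)
              + pvGet dp1 (r + 2 * s + 1) (c + 1) - pvGet dp1 (r + s + 1) (c - s + 1)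
              + pvGet dp2 (r + s + 1) (c - s) - pvGet dp2 (r + 1) c)) sums) sums) PySem.Set.empty
  PySem.List.slice (PySem.List.sorted sums (fun x => x) true) none (some 3)

-- ===== PRECONDITION & SPEC =====
-- Pre_ excludes exactly the inputs where the Python raises IndexError: the empty
-- grid (grid[0]) and ragged grids with a row shorter than row 0 (grid[r][c]).
def Pre_getBiggestThree (grid : List (List Int)) : Prop :=
  grid ≠ [] ∧ ∀ row ∈ grid, (grid.headD []).length ≤ row.length
instance (grid : List (List Int)) : Decidable (Pre_getBiggestThree grid) := by
  unfold Pre_getBiggestThree; infer_instance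
def pvWitness_getBiggestThree : List (List Int) := [[1, 2, 3], [4, 5, 6], [7, 8, 9]]
def Spec_getBiggestThree (grid : List (List Int)) (out : List Int) : Prop := out = getBiggestThree_alt grid
instance (grid : List (List Int)) (out : List Int) : Decidable (Spec_getBiggestThree grid out) := by unfold Spec_getBiggestThree; infer_instance

-- ===== CLAIM (what is proved, stated in full; the proofs are below) =====
def Claim_equal_getBiggestThree : Prop := ∀ (grid : List (List Int)), Dom_getBiggestThree grid → Pre_getBiggestThree grid → Spec_getBiggestThree grid (getBiggestThree grid)

-- ===== LEMMAS AND PROOFS =====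

-- grid cell as a total Nat-indexed function (matches pvGet at nonnegative casts)
def pvGG (grid : List (List Int)) (r c : Nat) : Int := (grid.getD r []).getD c 0

-- value of B's first table ("\" diagonal prefix sums), by its recurrence
def pvD1 (grid : List (List Int)) : Nat → Nat → Int
  | 0, _ => 0
  | _ + 1, 0 => 0
  | r + 1, c + 1 => pvD1 grid r c + pvGG grid r c

-- value of B's second table ("/" diagonal prefix sums), n = row width
def pvD2 (grid : List (List Int)) (n : Nat) : Nat → Nat → Int
  | 0, _ => 0
  | r + 1, c => if c < n then pvD2 grid n r (c + 1) + pvGG grid r c else 0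

theorem pvGet_cast (grid : List (List Int)) (r c : Nat) :
    pvGet grid (r : Int) (c : Int) = pvGG grid r c := by
  simp [pvGet, pvGG, PySem.List.pyGetD_natCast]

theorem pvT1 (grid : List (List Int)) (s r c : Nat) :
    (((List.range s).map (fun k => pvGG grid (r + k) (c + k))).sum : Int)
      = pvD1 grid (r + s) (c + s) - pvD1 grid r c := by
  induction s with
  | zero => simp
  | succ s ih =>
    rw [List.range_succ, List.map_append, List.sum_append, ih]
    have h : pvD1 grid (r + (s + 1)) (c + (s + 1))
        = pvD1 grid (r + s) (c + s) + pvGG grid (r + s) (c + s) := by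
      have h1 : r + (s + 1) = (r + s) + 1 := by omega
      have h2 : c + (s + 1) = (c + s) + 1 := by omega
      rw [h1, h2]; rfl
    rw [h]; simp; ring

theorem pvT2 (grid : List (List Int)) (n : Nat) (s r c : Nat) (hc : c < n) (hs : s ≤ c + 1) :
    (((List.range s).map (fun k => pvGG grid (r + k) (c - k))).sum : Int)
      = pvD2 grid n (r + s) (c + 1 - s) - pvD2 grid n r (c + 1) := by
  induction s with
  | zero => simp
  | succ s ih =>
    rw [List.range_succ, List.map_append, List.sum_append, ih (by omega)]
    have h1 : r + (s + 1) = (r + s) + 1 := by omega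
    have h2 : c + 1 - (s + 1) = c - s := by omega
    have h3 : pvD2 grid n ((r + s) + 1) (c - s)
        = pvD2 grid n (r + s) ((c - s) + 1) + pvGG grid (r + s) (c - s) := by
      simp [pvD2, Nat.lt_of_le_of_lt (Nat.sub_le c s) hc]
    have h4 : (c - s) + 1 = c + 1 - s := by omega
    rw [h1, h2, h3, h4]; simp; ring

theorem pvT3 (grid : List (List Int)) (s a b : Nat) (ha : s ≤ a + 1) (hb : s ≤ b + 1) :
    (((List.range s).map (fun k => pvGG grid (a - k) (b - k))).sum : Int)
      = pvD1 grid (a + 1) (b + 1) - pvD1 grid (a + 1 - s) (b + 1 - s) := by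
  induction s with
  | zero => simp
  | succ s ih =>
    rw [List.range_succ, List.map_append, List.sum_append, ih (by omega) (by omega)]
    have h1 : a + 1 - s = (a - s) + 1 := by omega
    have h2 : b + 1 - s = (b - s) + 1 := by omega
    have h3 : pvD1 grid ((a - s) + 1) ((b - s) + 1)
        = pvD1 grid (a - s) (b - s) + pvGG grid (a - s) (b - s) := rfl
    have h4 : a + 1 - (s + 1) = a - s := by omega
    have h5 : b + 1 - (s + 1) = b - s := by omega
    rw [h1, h2, h3, h4, h5]; simp; ring

theorem pvT4 (grid : List (List Int)) (n : Nat) (s a b : Nat) (ha : s ≤ a + 1) (hb : b + s ≤ n) :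
    (((List.range s).map (fun k => pvGG grid (a - k) (b + k))).sum : Int)
      = pvD2 grid n (a + 1) b - pvD2 grid n (a + 1 - s) (b + s) := by
  induction s with
  | zero => simp
  | succ s ih =>
    rw [List.range_succ, List.map_append, List.sum_append, ih (by omega) (by omega)]
    have h1 : a + 1 - s = (a - s) + 1 := by omega
    have h3 : pvD2 grid n ((a - s) + 1) (b + s)
        = pvD2 grid n (a - s) ((b + s) + 1) + pvGG grid (a - s) (b + s) := by
      simp [pvD2, show b + s < n by omega]
    have h4 : a + 1 - (s + 1) = a - s := by omega
    have h5 : b + (s + 1) = (b + s) + 1 := by omega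
    rw [h1, h3, h4, h5]; simp; ring

-- row i of B's tables, as the map of pvD1/pvD2 over column indices
def pvRow1 (grid : List (List Int)) (n i : Nat) : List Int :=
  (List.range (n + 1)).map (fun j => pvD1 grid i j)
def pvRow2 (grid : List (List Int)) (n i : Nat) : List Int :=
  (List.range (n + 1)).map (fun j => pvD2 grid n i j)

theorem pvRow1_zero (grid : List (List Int)) (n : Nat) :
    pvRow1 grid n 0 = List.replicate (n + 1) (0 : Int) := by
  simp [pvRow1, pvD1, List.map_const']

theorem pvRow2_zero (grid : List (List Int)) (n : Nat) :
    pvRow2 grid n 0 = List.replicate (n + 1) (0 : Int) := by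
  simp [pvRow2, pvD2, List.map_const']

theorem pvDpBuild (grid : List (List Int)) (n : Nat) (k : Nat) :
    (PySem.List.pyRange 0 (k : Int)).foldl (pvDpStep grid (n : Int))
        ([PySem.List.pyRepeat [(0 : Int)] ((n : Int) + 1)], [PySem.List.pyRepeat [(0 : Int)] ((n : Int) + 1)])
      = ((List.range (k + 1)).map (pvRow1 grid n), (List.range (k + 1)).map (pvRow2 grid n)) := by
  have htn : ((n : Int) + 1).toNat = n + 1 := by omega
  have hinit : PySem.List.pyRepeat [(0 : Int)] ((n : Int) + 1) = List.replicate (n + 1) (0 : Int) := by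
    rw [PySem.List.pyRepeat_singleton, htn]
  induction k with
  | zero =>
    simp only [Nat.cast_zero]
    rw [PySem.List.pyRange_one_eq_nil le_rfl, List.foldl_nil, hinit]
    simp [pvRow1_zero, pvRow2_zero]
  | succ k ih =>
    have hsplit : PySem.List.pyRange 0 ((k : Int) + 1)
        = PySem.List.pyRange 0 (k : Int) ++ [(k : Int)] :=
      PySem.List.pyRange_one_succ_right (by omega)
    have hcast : ((k + 1 : Nat) : Int) = (k : Int) + 1 := by omega
    rw [hcast, hsplit, List.foldl_append, ih]
    simp only [List.foldl_cons, List.foldl_nil]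
    rw [pvDpStep]
    have hp1 : PySem.List.pyGetD ((List.range (k + 1)).map (pvRow1 grid n)) (k : Int) []
        = pvRow1 grid n k := by
      rw [PySem.List.pyGetD_natCast, PySem.List.getD_map_range _ _ _ _ (by omega)]
    have hp2 : PySem.List.pyGetD ((List.range (k + 1)).map (pvRow2 grid n)) (k : Int) []
        = pvRow2 grid n k := by
      rw [PySem.List.pyGetD_natCast, PySem.List.getD_map_range _ _ _ _ (by omega)]
    have hrow : PySem.List.pyGetD grid (k : Int) [] = grid.getD k [] :=
      PySem.List.pyGetD_natCast _ _ _
    have hrange : PySem.List.pyRange 0 (n : Int) = (List.range n).map (fun j : Nat => (j : Int)) :=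
      PySem.List.pyRange_zero_nat n
    have hnew1 : (0 : Int) :: (PySem.List.pyRange 0 (n : Int)).map
          (fun c => PySem.List.pyGetD (pvRow1 grid n k) c 0 + PySem.List.pyGetD (grid.getD k []) c 0)
        = pvRow1 grid n (k + 1) := by
      rw [hrange, List.map_map]
      rw [show pvRow1 grid n (k + 1)
            = (0 : Int) :: (List.range n).map (fun j => pvD1 grid k j + pvGG grid k j) by
        rw [pvRow1, List.range_succ_eq_map, List.map_cons, List.map_map]
        refine congrArg₂ List.cons (by simp [pvD1]) ?_
        apply List.map_congr_left
        intro j hj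
        simp [Function.comp, pvD1]]
      congr 1
      apply List.map_congr_left
      intro j hj
      simp only [List.mem_range] at hj
      simp only [Function.comp_apply]
      rw [PySem.List.pyGetD_natCast, PySem.List.pyGetD_natCast, pvRow1,
        PySem.List.getD_map_range _ _ _ _ (by omega)]
      rfl
    have hnew2 : ((PySem.List.pyRange 0 (n : Int)).map
          (fun c => PySem.List.pyGetD (pvRow2 grid n k) (c + 1) 0 + PySem.List.pyGetD (grid.getD k []) c 0)) ++ [(0 : Int)]
        = pvRow2 grid n (k + 1) := by
      rw [hrange, List.map_map]
      rw [show pvRow2 grid n (k + 1)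
            = ((List.range n).map (fun j => pvD2 grid n k (j + 1) + pvGG grid k j)) ++ [(0 : Int)] by
        rw [pvRow2, List.range_succ, List.map_append]
        congr 1
        · apply List.map_congr_left
          intro j hj
          simp only [List.mem_range] at hj
          simp [pvD2, hj]
        · simp [pvD2]]
      congr 1
      apply List.map_congr_left
      intro j hj
      simp only [List.mem_range] at hj
      simp only [Function.comp_apply]
      have hc : ((j : Int) + 1) = ((j + 1 : Nat) : Int) := by omega
      rw [hc, PySem.List.pyGetD_natCast, PySem.List.pyGetD_natCast, pvRow2,
        PySem.List.getD_map_range _ _ _ _ (by omega)]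
      rfl
    rw [hp1, hp2, hrow, hnew1, hnew2]
    rw [show List.range (k + 1 + 1) = List.range (k + 1) ++ [k + 1] from List.range_succ,
      List.map_append, List.map_append]
    rw [show List.range (k + 1) = List.range k ++ [k] from List.range_succ]
    simp

theorem pvLookup1 (grid : List (List Int)) (n m i j : Nat) (hi : i ≤ m) (hj : j ≤ n) :
    pvGet ((List.range (m + 1)).map (pvRow1 grid n)) (i : Int) (j : Int) = pvD1 grid i j := by
  rw [pvGet, PySem.List.pyGetD_natCast, PySem.List.pyGetD_natCast,
    PySem.List.getD_map_range _ _ _ _ (by omega), pvRow1,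
    PySem.List.getD_map_range _ _ _ _ (by omega)]

theorem pvLookup2 (grid : List (List Int)) (n m i j : Nat) (hi : i ≤ m) (hj : j ≤ n) :
    pvGet ((List.range (m + 1)).map (pvRow2 grid n)) (i : Int) (j : Int) = pvD2 grid n i j := by
  rw [pvGet, PySem.List.pyGetD_natCast, PySem.List.pyGetD_natCast,
    PySem.List.getD_map_range _ _ _ _ (by omega), pvRow2,
    PySem.List.getD_map_range _ _ _ _ (by omega)]

-- the while condition is exactly 's ≤ min(min((m-1-r)//2, c), n-1-c)'
theorem pvCond_iff (m n r c s : Int) :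
    (r + 2 * s < m ∧ 0 ≤ c - s ∧ c + s < n)
      ↔ s ≤ min (min (PySem.Int.floordiv (m - 1 - r) 2) c) (n - 1 - c) := by
  have h := PySem.Int.le_floordiv_iff_mul_le (a := m - 1 - r) (b := 2) (q := s) (by omega)
  rw [le_min_iff, le_min_iff, h]
  omega

theorem pvWhileA_eq (grid : List (List Int)) (m n r c : Int) (fuel : Nat) :
    ∀ (s : Int) (acc : PySem.Set Int),
      ((min (min (PySem.Int.floordiv (m - 1 - r) 2) c) (n - 1 - c) + 1 - s).toNat ≤ fuel) →
      pvWhileA grid m n r c s acc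
        = (PySem.List.pyRange s (min (min (PySem.Int.floordiv (m - 1 - r) 2) c) (n - 1 - c) + 1)).foldl
            (fun acc s' => acc.add (pvBorderA grid r c s')) acc := by
  induction fuel with
  | zero =>
    intro s acc h
    rw [pvWhileA]
    have hns : ¬ (r + 2 * s < m ∧ 0 ≤ c - s ∧ c + s < n) := by
      rw [pvCond_iff]; omega
    rw [dif_neg hns]
    rw [PySem.List.pyRange_one_eq_nil (by omega), List.foldl_nil]
  | succ fuel ih =>
    intro s acc h
    rw [pvWhileA]
    by_cases hc : r + 2 * s < m ∧ 0 ≤ c - s ∧ c + s < n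
    · have hle : s ≤ min (min (PySem.Int.floordiv (m - 1 - r) 2) c) (n - 1 - c) :=
        (pvCond_iff m n r c s).mp hc
      generalize hS : min (min (PySem.Int.floordiv (m - 1 - r) 2) c) (n - 1 - c) = S at *
      rw [PySem.List.pyRange_one_cons (show s < S + 1 by omega), List.foldl_cons,
        dif_pos hc, ih (s + 1) _ (by omega)]
    · have hgt : ¬ s ≤ min (min (PySem.Int.floordiv (m - 1 - r) 2) c) (n - 1 - c) :=
        fun hle => hc ((pvCond_iff m n r c s).mpr hle)
      generalize hS : min (min (PySem.Int.floordiv (m - 1 - r) 2) c) (n - 1 - c) = S at *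
      rw [dif_neg hc, PySem.List.pyRange_one_eq_nil (by omega), List.foldl_nil]

-- A's four side loops equal B's four prefix-sum differences, Nat-indexed
theorem pvBorder_eq (grid : List (List Int)) (n r c s : Nat)
    (hsc : s ≤ c) (hcs : c + s < n) :
    pvBorderA grid (r : Int) (c : Int) (s : Int)
      = pvD1 grid (r + s) (c + s) - pvD1 grid r c
        + (pvD2 grid n (r + 2 * s) (c + 1) - pvD2 grid n (r + s) (c + s + 1))
        + (pvD1 grid (r + 2 * s + 1) (c + 1) - pvD1 grid (r + s + 1) (c - s + 1))
        + (pvD2 grid n (r + s + 1) (c - s) - pvD2 grid n (r + 1) c) := by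
  have hr0 : PySem.List.pyRange 0 (s : Int) = (List.range s).map (fun k : Nat => (k : Int)) :=
    PySem.List.pyRange_zero_nat s
  rw [pvBorderA]
  rw [PySem.List.foldl_add, PySem.List.foldl_add, PySem.List.foldl_add, PySem.List.foldl_add]
  rw [hr0, List.map_map, List.map_map, List.map_map, List.map_map]
  have e1 : ((List.range s).map ((fun i => pvGet grid ((r : Int) + i) ((c : Int) + i)) ∘ (fun k : Nat => (k : Int)))).sum
      = pvD1 grid (r + s) (c + s) - pvD1 grid r c := by
    rw [List.map_congr_left (g := fun k => pvGG grid (r + k) (c + k)) ?_, pvT1]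
    intro k hk
    simp only [Function.comp_apply]
    rw [show ((r : Int) + (k : Nat)) = ((r + k : Nat) : Int) by omega,
      show ((c : Int) + (k : Nat)) = ((c + k : Nat) : Int) by omega, pvGet_cast]
  have e2 : ((List.range s).map ((fun i => pvGet grid ((r : Int) + (s : Int) + i) ((c : Int) + (s : Int) - i)) ∘ (fun k : Nat => (k : Int)))).sum
      = pvD2 grid n (r + 2 * s) (c + 1) - pvD2 grid n (r + s) (c + s + 1) := by
    rw [List.map_congr_left (g := fun k => pvGG grid ((r + s) + k) ((c + s) - k)) ?_]
    · rw [pvT2 grid n s (r + s) (c + s) (by omega) (by omega)]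
      rw [show r + s + s = r + 2 * s by omega, show c + s + 1 - s = c + 1 by omega]
    · intro k hk
      simp only [List.mem_range] at hk
      simp only [Function.comp_apply]
      rw [show ((r : Int) + (s : Int) + (k : Nat)) = (((r + s) + k : Nat) : Int) by omega,
        show ((c : Int) + (s : Int) - (k : Nat)) = (((c + s) - k : Nat) : Int) by omega, pvGet_cast]
  have e3 : ((List.range s).map ((fun i => pvGet grid ((r : Int) + 2 * (s : Int) - i) ((c : Int) - i)) ∘ (fun k : Nat => (k : Int)))).sum
      = pvD1 grid (r + 2 * s + 1) (c + 1) - pvD1 grid (r + s + 1) (c - s + 1) := by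
    rw [List.map_congr_left (g := fun k => pvGG grid ((r + 2 * s) - k) (c - k)) ?_]
    · rw [pvT3 grid s (r + 2 * s) c (by omega) (by omega)]
      rw [show r + 2 * s + 1 - s = r + s + 1 by omega, show c + 1 - s = c - s + 1 by omega]
    · intro k hk
      simp only [List.mem_range] at hk
      simp only [Function.comp_apply]
      rw [show ((r : Int) + 2 * (s : Int) - (k : Nat)) = (((r + 2 * s) - k : Nat) : Int) by omega,
        show ((c : Int) - (k : Nat)) = ((c - k : Nat) : Int) by omega, pvGet_cast]
  have e4 : ((List.range s).map ((fun i => pvGet grid ((r : Int) + (s : Int) - i) ((c : Int) - (s : Int) + i)) ∘ (fun k : Nat => (k : Int)))).sum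
      = pvD2 grid n (r + s + 1) (c - s) - pvD2 grid n (r + 1) c := by
    rw [List.map_congr_left (g := fun k => pvGG grid ((r + s) - k) ((c - s) + k)) ?_]
    · rw [pvT4 grid n s (r + s) (c - s) (by omega) (by omega)]
      rw [show r + s + 1 - s = r + 1 by omega, show c - s + s = c by omega]
    · intro k hk
      simp only [List.mem_range] at hk
      simp only [Function.comp_apply]
      rw [show ((r : Int) + (s : Int) - (k : Nat)) = (((r + s) - k : Nat) : Int) by omega,
        show ((c : Int) - (s : Int) + (k : Nat)) = (((c - s) + k : Nat) : Int) by omega, pvGet_cast]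
  rw [e1, e2, e3, e4]
  ring

theorem pvBody_eq (grid : List (List Int)) (r c : Int)
    (hr : 0 ≤ r) (hc0 : 0 ≤ c) (hcn : c < ((grid.getD 0 []).length : Int)) :
    ∀ (sums : PySem.Set Int),
    pvWhileA grid (grid.length : Int) ((grid.getD 0 []).length : Int) r c 1
        (sums.add (pvGet grid r c))
      = (PySem.List.pyRange 1 (min (min (PySem.Int.floordiv ((grid.length : Int) - 1 - r) 2) c)
            (((grid.getD 0 []).length : Int) - 1 - c) + 1)).foldl
          (fun sums s =>
            sums.add (pvGet ((List.range (grid.length + 1)).map (pvRow1 grid (grid.getD 0 []).length)) (r + s) (c + s)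
              - pvGet ((List.range (grid.length + 1)).map (pvRow1 grid (grid.getD 0 []).length)) r c
              + pvGet ((List.range (grid.length + 1)).map (pvRow2 grid (grid.getD 0 []).length)) (r + 2 * s) (c + 1)
              - pvGet ((List.range (grid.length + 1)).map (pvRow2 grid (grid.getD 0 []).length)) (r + s) (c + s + 1)
              + pvGet ((List.range (grid.length + 1)).map (pvRow1 grid (grid.getD 0 []).length)) (r + 2 * s + 1) (c + 1)
              - pvGet ((List.range (grid.length + 1)).map (pvRow1 grid (grid.getD 0 []).length)) (r + s + 1) (c - s + 1)
              + pvGet ((List.range (grid.length + 1)).map (pvRow2 grid (grid.getD 0 []).length)) (r + s + 1) (c - s)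
              - pvGet ((List.range (grid.length + 1)).map (pvRow2 grid (grid.getD 0 []).length)) (r + 1) c))
          (sums.add (pvGet grid r c)) := by
  intro sums
  set mN := grid.length with hmN
  set nN := (grid.getD 0 []).length with hnN
  set S := min (min (PySem.Int.floordiv ((mN : Int) - 1 - r) 2) c) ((nN : Int) - 1 - c) with hS
  rw [pvWhileA_eq grid (mN : Int) (nN : Int) r c (S + 1 - 1).toNat 1 _ (by omega)]
  apply PySem.List.foldl_congr_mem
  intro acc s hs
  rw [PySem.List.mem_pyRange_one] at hs
  have hcond : r + 2 * s < (mN : Int) ∧ 0 ≤ c - s ∧ c + s < (nN : Int) :=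
    (pvCond_iff (mN : Int) (nN : Int) r c s).mpr (by omega)
  obtain ⟨h1, h2, h3⟩ := hcond
  lift r to ℕ using hr with rn
  lift c to ℕ using hc0 with cn
  lift s to ℕ using (by omega : (0:Int) ≤ s) with sn
  congr 1
  rw [pvBorder_eq grid nN rn cn sn (by omega) (by omega)]
  rw [show ((rn : Int) + (sn : Int)) = ((rn + sn : Nat) : Int) by omega,
    show ((cn : Int) + (sn : Int)) = ((cn + sn : Nat) : Int) by omega,
    show ((rn : Int) + 2 * (sn : Int)) = ((rn + 2 * sn : Nat) : Int) by omega,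
    show ((cn : Int) + 1) = ((cn + 1 : Nat) : Int) by omega,
    show ((cn + sn : Nat) : Int) + 1 = ((cn + sn + 1 : Nat) : Int) by omega,
    show ((rn + 2 * sn : Nat) : Int) + 1 = ((rn + 2 * sn + 1 : Nat) : Int) by omega,
    show ((rn + sn : Nat) : Int) + 1 = ((rn + sn + 1 : Nat) : Int) by omega,
    show ((cn : Int) - (sn : Int) + 1) = ((cn - sn + 1 : Nat) : Int) by omega,
    show ((cn : Int) - (sn : Int)) = ((cn - sn : Nat) : Int) by omega,
    show ((rn : Int) + 1) = ((rn + 1 : Nat) : Int) by omega]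
  rw [pvLookup1 grid nN mN (rn + sn) (cn + sn) (by omega) (by omega),
    pvLookup1 grid nN mN rn cn (by omega) (by omega),
    pvLookup2 grid nN mN (rn + 2 * sn) (cn + 1) (by omega) (by omega),
    pvLookup2 grid nN mN (rn + sn) (cn + sn + 1) (by omega) (by omega),
    pvLookup1 grid nN mN (rn + 2 * sn + 1) (cn + 1) (by omega) (by omega),
    pvLookup1 grid nN mN (rn + sn + 1) (cn - sn + 1) (by omega) (by omega),
    pvLookup2 grid nN mN (rn + sn + 1) (cn - sn) (by omega) (by omega),
    pvLookup2 grid nN mN (rn + 1) cn (by omega) (by omega)]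
  ring

-- ===== VERDICT (by name: the statement is the Claim_ definition above) =====
theorem getBiggestThree_spec : Claim_equal_getBiggestThree := by
  intro grid _ _
  show getBiggestThree grid = getBiggestThree_alt grid
  simp only [getBiggestThree, getBiggestThree_alt]
  rw [PySem.List.pyGetD_zero, pvDpBuild grid ((grid.getD 0 []).length) grid.length]
  refine congrArg (fun l => PySem.List.slice (PySem.List.sorted l (fun x => x) true) none (some 3)) ?_
  dsimp only
  apply PySem.List.foldl_congr_mem
  intro acc r hr
  rw [PySem.List.mem_pyRange_one] at hr
  apply PySem.List.foldl_congr_mem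
  intro acc' c hc
  rw [PySem.List.mem_pyRange_one] at hc
  exact pvBody_eq grid r c hr.1 hc.1 hc.2 acc'
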